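-- pv_equiv track=rewrite | github.com/psp515/IntroductionToComputerScience | Z2/Programs/task13.py | is_last_digit_unical
-- ===== SOURCE A (Python) =====
-- def is_last_digit_unical(n):
--     if n < 0:
--         return False
--     last_digit = n % 10
--     n = n // 10
--     while n > 0:
--         if n % 10 == last_digit:
--             return False
--         n = n // 10
--     return True
-- ===== SOURCE B (Python) =====
-- def is_last_digit_unical(n):
--     if n < 0:
--         return False
--     s = str(n)
--     return s[-1] not in s[:-1]
-- ===== Notes on version B (the rewrite author's own statement) =====
-- stated objective: idiomatic
-- what changed: Replaces A's modulo/floor-division digit-comparison loop with the decimal string representation: s = str(n), answer is s[-1] not in s[:-1].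
import Mathlib
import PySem

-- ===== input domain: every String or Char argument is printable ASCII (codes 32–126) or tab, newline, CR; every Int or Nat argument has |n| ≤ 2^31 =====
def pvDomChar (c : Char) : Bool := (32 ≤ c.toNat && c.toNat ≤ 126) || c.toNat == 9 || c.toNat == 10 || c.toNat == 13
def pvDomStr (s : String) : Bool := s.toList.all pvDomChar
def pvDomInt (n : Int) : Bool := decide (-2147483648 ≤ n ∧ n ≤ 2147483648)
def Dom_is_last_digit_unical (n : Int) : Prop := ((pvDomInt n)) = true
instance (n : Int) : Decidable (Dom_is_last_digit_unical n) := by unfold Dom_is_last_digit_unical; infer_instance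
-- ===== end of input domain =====

-- B replaces A's `% 10` / `// 10` digit loop by the decimal string: `s[-1] not in s[:-1]` (idiomatic; same cost).

-- ===== PORT A =====
-- the `while n > 0` loop of A, carrying (n, last_digit)
def pvLoopA (n last : Int) : Bool :=
  if _h : 0 < n then
    if PySem.Int.mod n 10 = last then false
    else pvLoopA (PySem.Int.floordiv n 10) last
  else true
termination_by n.toNat
decreasing_by
  rw [PySem.Int.floordiv_eq_ediv_of_pos (by norm_num)]
  omega

def is_last_digit_unical (n : Int) : Bool :=
  if n < 0 then false
  else pvLoopA (PySem.Int.floordiv n 10) (PySem.Int.mod n 10)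

-- ===== PORT B =====
def is_last_digit_unical_alt (n : Int) : Bool :=
  if n < 0 then false
  else
    let s := PySem.Int.toChars n        -- s = str(n)
    match PySem.List.pyGet? s (-1) with -- s[-1]; str(n) is never empty, so always `some`
    | some c => ! PySem.Chars.isIn [c] (PySem.List.slice s none (some (-1)))  -- s[-1] not in s[:-1]
    | none => false

-- ===== PRECONDITION & SPEC =====
def Spec_is_last_digit_unical (n : Int) (out : Bool) : Prop := out = is_last_digit_unical_alt n
instance (n : Int) (out : Bool) : Decidable (Spec_is_last_digit_unical n out) := by unfold Spec_is_last_digit_unical; infer_instance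

-- ===== CLAIM (what is proved, stated in full; the proofs are below) =====
def Claim_equal_is_last_digit_unical : Prop := ∀ (n : Int), Dom_is_last_digit_unical n → Spec_is_last_digit_unical n (is_last_digit_unical n)

-- ===== LEMMAS AND PROOFS =====

-- the decimal characters of a positive number, most significant first ([] for 0)
def pvCharsOf : Nat → List Char
  | 0 => []
  | m+1 => pvCharsOf ((m+1)/10) ++ [Nat.digitChar ((m+1) % 10)]
decreasing_by exact Nat.div_lt_self (Nat.succ_pos m) (by norm_num)

lemma pvCharsOf_pos (m : Nat) (hm : 0 < m) :
    pvCharsOf m = pvCharsOf (m/10) ++ [Nat.digitChar (m % 10)] := by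
  cases m with
  | zero => omega
  | succ k => rw [pvCharsOf]

lemma pvToDigitsCore_eq : ∀ (f n : Nat) (l : List Char), n ≤ f →
    Nat.toDigitsCore 10 (f+1) n l = (if n = 0 then ['0'] else pvCharsOf n) ++ l := by
  intro f
  induction f with
  | zero =>
    intro n l hn
    interval_cases n
    simp [Nat.toDigitsCore]
    rfl
  | succ f ih =>
    intro n l hn
    have hstep : Nat.toDigitsCore 10 (f+1+1) n l =
        if n / 10 = 0 then Nat.digitChar (n % 10) :: l
        else Nat.toDigitsCore 10 (f+1) (n/10) (Nat.digitChar (n % 10) :: l) := rfl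
    rw [hstep]
    by_cases h0 : n / 10 = 0
    · rw [if_pos h0]
      by_cases hz : n = 0
      · subst hz; rfl
      · rw [if_neg hz, pvCharsOf_pos n (by omega), h0]
        simp [pvCharsOf]
    · have h1 : n / 10 ≤ f := by
        have := Nat.div_lt_self (by omega : 0 < n) (by norm_num : 1 < 10)
        omega
      rw [if_neg h0, ih (n/10) (Nat.digitChar (n % 10) :: l) h1, if_neg h0,
          if_neg (by omega : ¬ n = 0), pvCharsOf_pos n (by omega)]
      simp only [List.append_assoc, List.singleton_append]

lemma pvToDigits_eq (m : Nat) :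
    Nat.toDigits 10 m = if m = 0 then ['0'] else pvCharsOf m := by
  have := pvToDigitsCore_eq m m [] (le_refl m)
  simpa [Nat.toDigits] using this

lemma pvDigitChar_inj : ∀ a b : Fin 10, (Nat.digitChar a = Nat.digitChar b ↔ (a:Nat) = (b:Nat)) := by decide

lemma pvIsIn_singleton (c : Char) (l : List Char) :
    PySem.Chars.isIn [c] l = decide (c ∈ l) := by
  by_cases h : c ∈ l
  · simp only [h, decide_true]
    rw [PySem.Chars.isIn_iff_infix, List.singleton_infix_iff]
    exact h
  · simp only [h, decide_false]
    rw [PySem.Chars.isIn_eq_false_iff, List.singleton_infix_iff]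
    exact h

lemma pvLoop_eq (m d : Nat) (hd : d < 10) :
    pvLoopA (m : Int) (d : Int) = ! decide (Nat.digitChar d ∈ pvCharsOf m) := by
  induction m using Nat.strong_induction_on with
  | _ m ih =>
    by_cases hm : m = 0
    · subst hm
      rw [pvLoopA]
      simp [pvCharsOf]
    · rw [pvLoopA]
      have hpos : (0:Int) < (m:Int) := by exact_mod_cast Nat.pos_of_ne_zero hm
      rw [dif_pos hpos]
      rw [pvCharsOf_pos m (Nat.pos_of_ne_zero hm)]
      have hfd : PySem.Int.floordiv (m:Int) 10 = ((m/10 : Nat) : Int) := by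
        exact_mod_cast PySem.Int.floordiv_natCast m 10
      have hmd : PySem.Int.mod (m:Int) 10 = ((m % 10 : Nat) : Int) := by
        exact_mod_cast PySem.Int.mod_natCast m 10
      rw [hfd, hmd]
      by_cases he : m % 10 = d
      · rw [if_pos (by exact_mod_cast he), he]
        simp
      · rw [if_neg (by exact_mod_cast he)]
        rw [ih (m/10) (Nat.div_lt_self (Nat.pos_of_ne_zero hm) (by norm_num))]
        have hne : Nat.digitChar d ≠ Nat.digitChar (m % 10) := by
          intro hc
          have := (pvDigitChar_inj ⟨m % 10, Nat.mod_lt m (by norm_num)⟩ ⟨d, hd⟩).mp hc.symm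
          simp at this
          exact he this
        simp [hne]

lemma pvLast_get (a : List Char) (x : Char) :
    PySem.List.pyGet? (a ++ [x]) (-1) = some x := by
  simp [PySem.List.pyGet?, PySem.List.pyIdx?]

-- ===== VERDICT (by name: the statement is the Claim_ definition above) =====
theorem is_last_digit_unical_spec : Claim_equal_is_last_digit_unical := by
  intro n _
  unfold Spec_is_last_digit_unical is_last_digit_unical is_last_digit_unical_alt
  by_cases hn : n < 0
  · simp [hn]
  · rw [if_neg hn, if_neg hn]
    obtain ⟨m, rfl⟩ : ∃ m : Nat, n = (m : Int) := ⟨n.toNat, by omega⟩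
    have hfd : PySem.Int.floordiv (m:Int) 10 = ((m/10 : Nat) : Int) := by
      exact_mod_cast PySem.Int.floordiv_natCast m 10
    have hmd : PySem.Int.mod (m:Int) 10 = ((m % 10 : Nat) : Int) := by
      exact_mod_cast PySem.Int.mod_natCast m 10
    rw [hfd, hmd]
    have hs : PySem.Int.toChars (m : Int) = if m = 0 then ['0'] else pvCharsOf m := by
      rw [show PySem.Int.toChars (m : Int) = Nat.toDigits 10 m by
            simp [PySem.Int.toChars, hn]]
      exact pvToDigits_eq m
    by_cases hm : m = 0
    · subst hm
      rw [hs, if_pos rfl, pvLoopA]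
      simp [pysem, pvIsIn_singleton, PySem.List.pyGet?, PySem.List.pyIdx?]
    · rw [hs, if_neg hm]
      rw [pvCharsOf_pos m (Nat.pos_of_ne_zero hm)]
      have hsl : PySem.List.slice (pvCharsOf (m/10) ++ [Nat.digitChar (m % 10)]) none (some (-1))
          = pvCharsOf (m/10) := by
        simp [pysem]
      simp only [pvLast_get, hsl]
      rw [pvIsIn_singleton]
      exact pvLoop_eq (m/10) (m % 10) (Nat.mod_lt m (by norm_num))
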